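-- pv_equiv track=rewrite | github.com/vivekisreddy/RBE3002_Navigation-ROS2 | KasireddyVivek/ex1.py | robot_move
-- ===== SOURCE A (Python) =====
-- def robot_move(moves):
--     x = 0
--     y = 0
--
--     for move in moves:
--         direction, steps = move
--
--         if direction == 'N':
--             y += steps
--         elif direction == 'S':
--             y -= steps
--         elif direction == 'E':
--             x += steps
--         elif direction == 'W':
--             x -= steps
--
--     return (x, y)
-- ===== SOURCE B (Python) =====
-- def robot_move(moves):
--     x = sum(s for d, s in moves if d == 'E') - sum(s for d, s in moves if d == 'W')
--     y = sum(s for d, s in moves if d == 'N') - sum(s for d, s in moves if d == 'S')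
--     return (x, y)
-- ===== Notes on version B (the rewrite author's own statement) =====
-- stated objective: simpler
-- what changed: Replaced the single branching accumulator loop by four independent filtered sums, one per direction, combined per coordinate.
import Mathlib
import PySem

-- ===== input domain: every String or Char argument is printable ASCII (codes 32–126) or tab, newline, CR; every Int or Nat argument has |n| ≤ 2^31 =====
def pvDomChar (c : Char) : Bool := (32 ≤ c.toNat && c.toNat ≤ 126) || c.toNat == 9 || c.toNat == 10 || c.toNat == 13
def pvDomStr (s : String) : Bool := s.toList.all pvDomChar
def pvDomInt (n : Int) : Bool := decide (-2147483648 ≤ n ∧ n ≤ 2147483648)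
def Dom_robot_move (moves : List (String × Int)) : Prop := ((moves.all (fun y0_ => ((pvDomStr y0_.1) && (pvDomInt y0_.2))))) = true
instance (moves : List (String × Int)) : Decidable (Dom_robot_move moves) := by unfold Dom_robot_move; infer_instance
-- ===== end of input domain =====

-- ===== PORT A =====
def robot_move (moves : List (String × Int)) : Int × Int :=
  moves.foldl (fun (acc : Int × Int) move =>
    let direction := move.1
    let steps := move.2
    if direction == "N" then (acc.1, acc.2 + steps)
    else if direction == "S" then (acc.1, acc.2 - steps)
    else if direction == "E" then (acc.1 + steps, acc.2)
    else if direction == "W" then (acc.1 - steps, acc.2)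
    else acc) (0, 0)

-- ===== PORT B =====
def sumIf (moves : List (String × Int)) (d : String) : Int :=
  ((moves.filter (fun m => m.1 == d)).map (fun m => m.2)).sum

def robot_move_alt (moves : List (String × Int)) : Int × Int :=
  (sumIf moves "E" - sumIf moves "W", sumIf moves "N" - sumIf moves "S")

-- header: B computes each coordinate as independent filtered sums instead of one branching loop (simpler)

-- ===== PRECONDITION & SPEC =====
def Spec_robot_move (moves : List (String × Int)) (out : Int × Int) : Prop := out = robot_move_alt moves
instance (moves : List (String × Int)) (out : Int × Int) : Decidable (Spec_robot_move moves out) := by unfold Spec_robot_move; infer_instance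

-- ===== CLAIM (what is proved, stated in full; the proofs are below) =====
def Claim_equal_robot_move : Prop := ∀ (moves : List (String × Int)), Dom_robot_move moves → Spec_robot_move moves (robot_move moves)

-- ===== LEMMAS AND PROOFS =====

-- ===== VERDICT (by name: the statement is the Claim_ definition above) =====
lemma robot_move_inv (moves : List (String × Int)) (x y : Int) :
    moves.foldl (fun (acc : Int × Int) move =>
      let direction := move.1
      let steps := move.2
      if direction == "N" then (acc.1, acc.2 + steps)
      else if direction == "S" then (acc.1, acc.2 - steps)
      else if direction == "E" then (acc.1 + steps, acc.2)
      else if direction == "W" then (acc.1 - steps, acc.2)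
      else acc) (x, y)
    = (x + sumIf moves "E" - sumIf moves "W", y + sumIf moves "N" - sumIf moves "S") := by
  induction moves generalizing x y with
  | nil => simp [sumIf]
  | cons m ms ih =>
    obtain ⟨d, st⟩ := m
    simp only [List.foldl_cons]
    by_cases hN : d = "N" <;> by_cases hS : d = "S" <;> by_cases hE : d = "E" <;> by_cases hW : d = "W" <;>
      simp_all [sumIf, ih] <;> ring

theorem robot_move_spec : Claim_equal_robot_move := by
  intro moves _
  show robot_move moves = robot_move_alt moves
  unfold robot_move robot_move_alt
  rw [robot_move_inv]
  ring_nf
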